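-- pv_equiv track=rewrite | github.com/UJHa/Codeit-Study | 프로그래머스/00_ 코딩테스트 고득점 Kit/08_깊이,너비 우선 탐색 - DFS,BFS/3_단어_변환/jinhwan.py | solution
-- ===== SOURCE A (Python) =====
-- from collections import deque
--
-- def solution(begin, target, words):
--     if target not in words:
--         return 0
--
--     visit_check_dict = {}
--     for w in words:
--         visit_check_dict[w] = False
--
--     answer = 0
--     find_queue = deque()
--     find_queue.append(begin)
--     while len(find_queue) > 0:
--         cur_word = find_queue.pop()
--         visit_check_dict[cur_word] = True
--         answer += 1
--         if cur_word == target: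
--             break
--         for word, is_visited in visit_check_dict.items():
--             # 1개의 글자가 차이날 때
--             if len(set(cur_word + word)) == len(cur_word) + 1 and is_visited is False:
--                 if word not in find_queue:
--                     find_queue.append(word)
--
--     return answer - 1
-- ===== SOURCE B (Python) =====
-- def solution(begin, target, words):
--     if target not in words:
--         return 0
--     distinct = list(dict.fromkeys(words))
--
--     def neighbors(src):
--         return [w for w in distinct if len(set(src + w)) == len(src) + 1]
--
--     def order(stack, seen):
--         # stack: head is the next word to visit; returns the full visit sequence
--         if not stack:
--             return []
--         cur, rest = stack[0], stack[1:]
--         seen = seen | {cur}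
--         pushed = [w for w in neighbors(cur) if w not in seen and w not in rest]
--         return [cur] + order(list(reversed(pushed)) + rest, seen)
--
--     seq = order([begin], set())
--     return seq.index(target) if target in seq else len(seq) - 1
-- ===== Notes on version B (the rewrite author's own statement) =====
-- stated objective: alternative
-- what changed: B is a staged, recursive formulation: it recursively generates the complete visit sequence of the traversal (head-first stack, no counter, no break, visited as a plain set over deduplicated words) and then returns the index of target in that sequence (or its length minus one), instead of A's imperative while-loop over a deque and a visited-flag dict that counts pops and breaks at the target.
import Mathlib
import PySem

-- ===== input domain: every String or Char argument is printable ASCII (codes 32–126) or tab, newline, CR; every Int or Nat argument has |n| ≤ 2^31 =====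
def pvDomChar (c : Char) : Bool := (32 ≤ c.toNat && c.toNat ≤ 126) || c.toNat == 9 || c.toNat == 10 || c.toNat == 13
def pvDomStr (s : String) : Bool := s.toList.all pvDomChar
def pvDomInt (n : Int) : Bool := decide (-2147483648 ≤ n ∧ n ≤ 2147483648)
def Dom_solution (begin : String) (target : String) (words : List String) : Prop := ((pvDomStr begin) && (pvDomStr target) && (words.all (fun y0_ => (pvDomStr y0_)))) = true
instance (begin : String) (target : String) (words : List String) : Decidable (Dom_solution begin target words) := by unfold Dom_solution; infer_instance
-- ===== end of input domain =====

-- B recursively generates the full visit sequence (no counter, no break) and looks up the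
-- target's position in it, replacing A's counting while-loop over a deque and a flag dict
-- (objective: alternative).

-- shared helper of both ports: len(set(src + w)) == len(src) + 1
def oneDiff (src w : String) : Bool :=
  PySem.Set.len (PySem.Set.ofList (src.toList ++ w.toList)) == PySem.Str.len src + 1

-- ===== PORT A =====

-- deque.pop(): last element and the remaining deque
def popLastA : List String → Option (String × List String)
  | [] => none
  | [x] => some (x, [])
  | x :: y :: xs =>
    match popLastA (y :: xs) with
    | some (z, rest) => some (z, x :: rest)
    | none => none

-- the while-loop; fuel words.length + 2 bounds the number of iterations (each distinct word
-- and begin is popped at most once — pushes require 'not visited' and 'not in queue' — plus one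
-- final empty-queue check), so the fuel-0 branch is never reached from solution
def loopA (tgt : String) : Nat → PySem.Dict String Bool → List String → Int → Int
  | 0, _, _, ans => ans
  | fuel + 1, d, q, ans =>
    match popLastA q with
    | none => ans
    | some (cur, q') =>
      let d' := d.insert cur true
      let ans' := ans + 1
      if cur == tgt then ans'
      else
        let q'' := d'.items.foldl (fun acc p =>
          if oneDiff cur p.1 && (p.2 == false) && !(acc.contains p.1) then acc ++ [p.1] else acc) q'
        loopA tgt fuel d' q'' ans'

def solution (begin : String) (target : String) (words : List String) : Int :=
  if !(words.contains target) then 0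
  else
    let d0 := words.foldl (fun d w => d.insert w false) PySem.Dict.empty
    loopA target (words.length + 2) d0 [begin] 0 - 1

-- ===== PORT B =====

-- Source B's 'neighbors(src)'
def neighborsB (distinct : List String) (src : String) : List String :=
  distinct.filter (fun w => oneDiff src w)

-- Source B's recursive 'order(stack, seen)'; the fuel is only a termination device: each call adds
-- the popped head to 'seen' (stack words are never already seen), so at most
-- (distinct words) + 1 ≤ words.length + 1 recursive steps happen and fuel 0 is never reached
def orderB (distinct : List String) : Nat → List String → PySem.Set String → List String
  | 0, _, _ => []
  | fuel + 1, stack, seen =>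
    match stack with
    | [] => []
    | cur :: rest =>
      let seen' := PySem.Set.add seen cur
      let pushed := (neighborsB distinct cur).filter
        (fun w => !(seen'.contains w) && !(rest.contains w))
      cur :: orderB distinct fuel (pushed.reverse ++ rest) seen'

def solution_alt (begin : String) (target : String) (words : List String) : Int :=
  if !(words.contains target) then 0
  else
    let distinct := PySem.List.dedup words
    let seq := orderB distinct (words.length + 2) [begin] PySem.Set.empty
    match PySem.List.index? seq target with
    | some i => (i : Int)
    | none => (seq.length : Int) - 1

-- ===== PRECONDITION & SPEC =====
def Spec_solution (begin : String) (target : String) (words : List String) (out : Int) : Prop := out = solution_alt begin target words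
instance (begin : String) (target : String) (words : List String) (out : Int) : Decidable (Spec_solution begin target words out) := by unfold Spec_solution; infer_instance

-- ===== CLAIM (what is proved, stated in full; the proofs are below) =====
def Claim_equal_solution : Prop := ∀ (begin : String) (target : String) (words : List String), Dom_solution begin target words → Spec_solution begin target words (solution begin target words)

-- ===== LEMMAS AND PROOFS =====

-- proof-only intermediate: A's loop with the dict replaced by a visited set and the neighbour
-- scan replaced by the direct filter (tail-pop, counting, break at target)
def loopC (D : List String) (tgt : String) :
    Nat → PySem.Set String → List String → Int → Int
  | 0, _, _, cnt => cnt
  | fuel + 1, vis, stk, cnt =>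
    match stk.getLast? with
    | none => cnt
    | some cur =>
      let stk' := stk.dropLast
      let vis' := PySem.Set.add vis cur
      let cnt' := cnt + 1
      if cur == tgt then cnt'
      else
        let stk'' := (D.filter (fun w => oneDiff cur w)).foldl (fun acc w =>
          if !(vis'.contains w) && !(acc.contains w) then acc ++ [w] else acc) stk'
        loopC D tgt fuel vis' stk'' cnt'

-- position count: (first index of tgt) + 1, or the length when tgt is absent
def posCount (tgt : String) (seq : List String) : Int :=
  match PySem.List.index? seq tgt with
  | some i => (i : Int) + 1
  | none => (seq.length : Int)

-- A's visit_check_dict expressed through a visited list: every distinct word maps to its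
-- visited flag, and begin (once visited, when not itself a word) sits appended at the end, true.
def mkDictA (D : List String) (bg : String) (vis : List String) : PySem.Dict String Bool :=
  PySem.Dict.mk (D.map (fun w => (w, decide (w ∈ vis))) ++
    (if bg ∈ vis ∧ bg ∉ D then [(bg, true)] else []))

lemma items_mk (L : List (String × Bool)) : (PySem.Dict.mk L).items = L := rfl

lemma popLastA_eq (l : List String) :
    popLastA l = l.getLast?.map (fun x => (x, l.dropLast)) := by
  induction l with
  | nil => rfl
  | cons x xs ih =>
    cases xs with
    | nil => rfl
    | cons y ys =>
      simp only [popLastA, ih]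
      cases h : (y :: ys).getLast? with
      | none => simp at h
      | some z => simp [List.getLast?_cons_cons, h, List.dropLast]

lemma mem_foldl_push (p : List String → String → Bool) :
    ∀ (L q : List String) (x : String),
      x ∈ L.foldl (fun acc w => if p acc w then acc ++ [w] else acc) q →
      x ∈ q ∨ x ∈ L := by
  intro L
  induction L with
  | nil => intro q x h; exact Or.inl h
  | cons w L ih =>
    intro q x h
    simp only [List.foldl_cons] at h
    rcases ih _ x h with h' | h'
    · by_cases hp : p q w = true
      · simp only [hp, if_pos] at h'
        rcases List.mem_append.mp h' with h'' | h''
        · exact Or.inl h''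
        · simp at h''; exact Or.inr (by simp [h''])
      · simp only [hp] at h'
        exact Or.inl (by simpa using h')
    · exact Or.inr (by simp [h'])

lemma insert_mkDictA (D : List String) (bg cur : String) (vis : List String)
    (h : cur ∈ D ∨ cur = bg) :
    (mkDictA D bg vis).insert cur true = mkDictA D bg (PySem.Set.add vis cur) := by
  apply PySem.Dict.ext
  rw [PySem.Dict.items_insert]
  by_cases hD : cur ∈ D
  · have hcont : (mkDictA D bg vis).contains cur = true := by
      simp only [mkDictA, PySem.Dict.contains_mk, List.any_append, List.any_map,
        Bool.or_eq_true, List.any_eq_true]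
      exact Or.inl ⟨cur, hD, by simp⟩
    rw [if_pos hcont]
    simp only [mkDictA, items_mk]
    rw [List.map_append]
    congr 1
    · rw [List.map_map]
      apply List.map_congr_left
      intro w hw
      simp only [Function.comp]
      by_cases hwc : w = cur
      · subst hwc; simp
      · simp [hwc]
    · by_cases hbD : bg ∈ D
      · simp [hbD]
      · have hne : bg ≠ cur := fun e => hbD (e ▸ hD)
        by_cases hv : bg ∈ vis
        · simp [hbD, hv, hne]
        · simp [hbD, hv, hne]
  · have hcb : cur = bg := h.resolve_left hD
    subst hcb
    by_cases hv : cur ∈ vis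
    · have hcont : (mkDictA D cur vis).contains cur = true := by
        simp only [mkDictA, PySem.Dict.contains_mk, List.any_append, Bool.or_eq_true]
        right
        simp [hv, hD]
      rw [if_pos hcont]
      have hvadd : PySem.Set.add vis cur = vis := by
        show (if vis.contains cur then vis else vis ++ [cur]) = vis
        simp [hv]
      rw [hvadd]
      simp only [mkDictA, items_mk]
      rw [List.map_append]
      congr 1
      · rw [List.map_map]
        apply List.map_congr_left
        intro w hw
        have hne : w ≠ cur := fun e => hD (e ▸ hw)
        simp [Function.comp, hne]
      · simp [hv, hD]
    · have hcont : (mkDictA D cur vis).contains cur = false := by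
        apply Bool.eq_false_iff.mpr
        intro hc
        simp only [mkDictA, PySem.Dict.contains_mk, List.any_append, Bool.or_eq_true,
          List.any_eq_true] at hc
        rcases hc with ⟨p, hp, he⟩ | ⟨p, hp, he⟩
        · rcases List.mem_map.mp hp with ⟨w, hw, rfl⟩
          have : w = cur := by simpa using he
          exact hD (this ▸ hw)
        · rw [if_neg (by simp [hv])] at hp
          simp at hp
      rw [if_neg (by simp [hcont])]
      simp only [mkDictA, items_mk]
      have hvadd : PySem.Set.add vis cur = vis ++ [cur] := by
        show (if vis.contains cur then vis else vis ++ [cur]) = vis ++ [cur]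
        simp [hv]
      rw [hvadd]
      rw [show (if cur ∈ vis ∧ cur ∉ D then [(cur, true)] else ([] : List (String × Bool))) = [] from by simp [hv],
        show (if cur ∈ vis ++ [cur] ∧ cur ∉ D then [(cur, true)] else ([] : List (String × Bool))) = [(cur, true)] from by simp [hD]]
      rw [List.append_nil]
      congr 1
      apply List.map_congr_left
      intro w hw
      have hne : w ≠ cur := fun e => hD (e ▸ hw)
      simp [List.mem_append, hne]

lemma fold_map_eq (cur : String) (vis : List String) :
    ∀ (D q : List String),
      (D.map (fun w => (w, decide (w ∈ vis)))).foldl (fun acc p =>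
          if oneDiff cur p.1 && (p.2 == false) && !(acc.contains p.1) then acc ++ [p.1] else acc) q
      = (D.filter (fun w => oneDiff cur w)).foldl (fun acc w =>
          if !(vis.contains w) && !(acc.contains w) then acc ++ [w] else acc) q := by
  intro D
  induction D with
  | nil => intro q; rfl
  | cons w D ih =>
    intro q
    simp only [List.map_cons, List.foldl_cons, List.filter_cons]
    by_cases h1 : oneDiff cur w = true
    · rw [if_pos h1]
      simp only [List.foldl_cons]
      rw [ih]
      congr 1
      simp only [h1, Bool.true_and]
      by_cases h2 : w ∈ vis <;> simp [h2]
    · have h0 : oneDiff cur w = false := by simpa using h1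
      rw [if_neg (by simp [h0]), if_neg (by simp [h0])]
      exact ih q

lemma fold_items_eq (D : List String) (bg cur : String) (vis : List String) (q : List String) :
      (mkDictA D bg vis).items.foldl (fun acc p =>
          if oneDiff cur p.1 && (p.2 == false) && !(acc.contains p.1) then acc ++ [p.1] else acc) q
      = (D.filter (fun w => oneDiff cur w)).foldl (fun acc w =>
          if !(vis.contains w) && !(acc.contains w) then acc ++ [w] else acc) q := by
  simp only [mkDictA, items_mk]
  rw [List.foldl_append, fold_map_eq cur vis D q]
  by_cases hc : bg ∈ vis ∧ bg ∉ D
  · rw [if_pos hc]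
    simp
  · rw [if_neg hc]
    rfl

-- A's loop equals the set-based counting loop
lemma loopA_eq_loopC (bg tgt : String) (D : List String) :
    ∀ (fuel : Nat) (vis stk : List String) (cnt : Int),
      (∀ x ∈ stk, x ∈ D ∨ x = bg) →
      loopA tgt fuel (mkDictA D bg vis) stk cnt = loopC D tgt fuel vis stk cnt := by
  intro fuel
  induction fuel with
  | zero => intro vis stk cnt _; rfl
  | succ n ih =>
    intro vis stk cnt hstk
    rw [loopA, loopC, popLastA_eq]
    cases hq : stk.getLast? with
    | none => rfl
    | some cur =>
      have hcur : cur ∈ D ∨ cur = bg := hstk cur (List.mem_of_getLast? hq)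
      simp only [Option.map_some]
      show (if cur == tgt then cnt + 1 else _) = (if cur == tgt then cnt + 1 else _)
      by_cases ht : cur == tgt
      · rw [if_pos ht, if_pos ht]
      · rw [if_neg ht, if_neg ht]
        rw [insert_mkDictA D bg cur vis hcur,
          fold_items_eq D bg cur (PySem.Set.add vis cur) stk.dropLast]
        apply ih
        intro x hx
        rcases mem_foldl_push _ _ _ x hx with h' | h'
        · exact hstk x ((List.dropLast_sublist stk).subset h')
        · exact Or.inl (List.mem_of_mem_filter h')

lemma foldl_insert_false :
    ∀ (l E : List String),
      l.foldl (fun d w => d.insert w false) (PySem.Dict.mk (E.map (fun w => (w, false))))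
        = PySem.Dict.mk ((PySem.Set.update E l).map (fun w => (w, false))) := by
  intro l
  induction l with
  | nil => intro E; rfl
  | cons w l ih =>
    intro E
    simp only [List.foldl_cons]
    have hstep : (PySem.Dict.mk (E.map (fun w => (w, false)))).insert w false
        = PySem.Dict.mk ((PySem.Set.add E w).map (fun w => (w, false))) := by
      apply PySem.Dict.ext
      rw [PySem.Dict.items_insert]
      by_cases hE : w ∈ E
      · have hcont : (PySem.Dict.mk (E.map (fun w => (w, false)))).contains w = true := by
          simp only [PySem.Dict.contains_mk, List.any_map, List.any_eq_true]
          exact ⟨w, hE, by simp⟩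
        rw [if_pos hcont]
        have hadd : PySem.Set.add E w = E := by
          show (if E.contains w then E else E ++ [w]) = E
          simp [hE]
        rw [hadd]
        show List.map _ (List.map _ E) = _
        rw [List.map_map]
        apply List.map_congr_left
        intro x hx
        by_cases hxw : x = w
        · subst hxw; simp
        · simp [hxw]
      · have hcont : (PySem.Dict.mk (E.map (fun w => (w, false)))).contains w = false := by
          simp only [PySem.Dict.contains_mk, List.any_map, List.any_eq_false]
          intro x hx
          have : x ≠ w := fun e => hE (e ▸ hx)
          simp [Function.comp, this]
        rw [if_neg (by simp [hcont])]
        have hadd : PySem.Set.add E w = E ++ [w] := by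
          show (if E.contains w then E else E ++ [w]) = E ++ [w]
          simp [hE]
        rw [hadd]
        show _ = List.map _ (E ++ [w])
        rw [List.map_append]
        rfl
    rw [hstep, ih]
    rfl

lemma d0_eq (words : List String) (bg : String) :
    words.foldl (fun d w => d.insert w false) PySem.Dict.empty
      = mkDictA (PySem.List.dedup words) bg [] := by
  have h0 : (PySem.Dict.empty : PySem.Dict String Bool)
      = PySem.Dict.mk (([] : List String).map (fun w => (w, false))) := rfl
  rw [h0, foldl_insert_false words []]
  have h1 : PySem.Set.update [] words = PySem.List.dedup words := by
    rw [PySem.List.dedup_eq_ofList]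
    rfl
  rw [h1]
  unfold mkDictA
  simp

-- pushing the accepted neighbours one by one (with the growing-accumulator membership test)
-- is appending the filter against the initial queue, provided the candidate list has no duplicates
lemma foldl_push_filter (p : String → Bool) :
    ∀ (L q : List String), L.Nodup →
      L.foldl (fun acc w => if p w && !(acc.contains w) then acc ++ [w] else acc) q
        = q ++ L.filter (fun w => p w && !(q.contains w)) := by
  intro L
  induction L with
  | nil => intro q _; simp
  | cons w L ih =>
    intro q hnd
    have hwL : w ∉ L := (List.nodup_cons.mp hnd).1
    have hLnd : L.Nodup := (List.nodup_cons.mp hnd).2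
    simp only [List.foldl_cons, List.filter_cons]
    by_cases hp : (p w && !(q.contains w)) = true
    · rw [if_pos hp, ih _ hLnd, if_pos hp, List.append_assoc]
      simp only [List.singleton_append]
      congr 2
      apply List.filter_congr
      intro x hx
      have hxw : x ≠ w := fun e => hwL (e ▸ hx)
      simp [hxw]
    · rw [if_neg hp, ih _ hLnd, if_neg hp]

lemma posCount_cons_self (tgt : String) (s : List String) :
    posCount tgt (tgt :: s) = 1 := by
  unfold posCount
  rw [PySem.List.index?_cons_self]
  simp

lemma posCount_cons_ne (cur tgt : String) (s : List String) (h : cur ≠ tgt) :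
    posCount tgt (cur :: s) = posCount tgt s + 1 := by
  unfold posCount
  rw [PySem.List.index?_cons_of_ne s h]
  cases hi : PySem.List.index? s tgt with
  | none => simp
  | some i =>
    simp only [Option.map_some]
    push_cast
    ring

-- the counting loop computes the target's position in B's visit sequence
lemma loopC_eq_orderB (D : List String) (hD : D.Nodup) (tgt : String) :
    ∀ (fuel : Nat) (vis stk : List String) (cnt : Int),
      loopC D tgt fuel vis stk cnt = cnt + posCount tgt (orderB D fuel stk.reverse vis) := by
  intro fuel
  induction fuel with
  | zero => intro vis stk cnt; simp [loopC, orderB, posCount]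
  | succ n ih =>
    intro vis stk cnt
    rw [loopC]
    cases hr : stk.reverse with
    | nil =>
      have hnil : stk = [] := by simpa using congrArg List.reverse hr
      subst hnil
      simp [orderB, posCount]
    | cons cur rest =>
      have hstk : stk = rest.reverse ++ [cur] := by
        have h2 := congrArg List.reverse hr
        simpa using h2
      subst hstk
      simp only [List.getLast?_concat, List.dropLast_concat]
      rw [orderB]
      by_cases ht : cur == tgt
      · rw [if_pos ht]
        have : cur = tgt := by simpa using ht
        subst this
        rw [posCount_cons_self]
      · rw [if_neg ht]
        have hne : cur ≠ tgt := by simpa using ht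
        rw [foldl_push_filter (fun w => !((PySem.Set.add vis cur).contains w))
          (D.filter (fun w => oneDiff cur w)) rest.reverse (List.Nodup.filter _ hD), ih]
        have hseq : (rest.reverse ++
            (D.filter (fun w => oneDiff cur w)).filter
              (fun w => !((PySem.Set.add vis cur).contains w) && !(rest.reverse.contains w))).reverse
            = ((neighborsB D cur).filter
                (fun w => !((PySem.Set.add vis cur).contains w) && !(rest.contains w))).reverse
              ++ rest := by
          rw [List.reverse_append, List.reverse_reverse]
          congr 2
          apply List.filter_congr
          intro x hx
          have hcr : rest.reverse.contains x = rest.contains x := by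
            simp
          rw [hcr]
        rw [hseq, posCount_cons_ne cur tgt _ hne]
        ring

-- ===== VERDICT (by name: the statement is the Claim_ definition above) =====
theorem solution_spec : Claim_equal_solution := by
  intro bg tgt words _
  show solution bg tgt words = solution_alt bg tgt words
  unfold solution solution_alt
  by_cases hT : tgt ∈ words
  · rw [if_neg (by simp [hT]), if_neg (by simp [hT])]
    show loopA tgt (words.length + 2)
        (words.foldl (fun d w => d.insert w false) PySem.Dict.empty) [bg] 0 - 1
      = (match PySem.List.index? (orderB (PySem.List.dedup words) (words.length + 2) [bg]
            PySem.Set.empty) tgt with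
          | some i => (i : Int)
          | none => ((orderB (PySem.List.dedup words) (words.length + 2) [bg]
              PySem.Set.empty).length : Int) - 1)
    rw [d0_eq words bg,
      loopA_eq_loopC bg tgt (PySem.List.dedup words) (words.length + 2) [] [bg] 0
        (by intro x hx; simp at hx; exact Or.inr hx),
      loopC_eq_orderB (PySem.List.dedup words) (by rw [PySem.List.dedup_eq_ofList]; exact PySem.Set.nodup_ofList words) tgt
        (words.length + 2) [] [bg] 0]
    have hrev : ([bg] : List String).reverse = [bg] := rfl
    rw [hrev]
    unfold posCount
    cases hi : PySem.List.index? (orderB (PySem.List.dedup words) (words.length + 2) [bg]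
        PySem.Set.empty) tgt with
    | none =>
      have hi' : PySem.List.index? (orderB (PySem.List.dedup words) (words.length + 2) [bg]
          ([] : PySem.Set String)) tgt = none := hi
      rw [hi']
      simp
    | some i =>
      have hi' : PySem.List.index? (orderB (PySem.List.dedup words) (words.length + 2) [bg]
          ([] : PySem.Set String)) tgt = some i := hi
      rw [hi']
      simp
  · rw [if_pos (by simp [hT]), if_pos (by simp [hT])]
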